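-- pv_equiv track=rewrite | github.com/tedunderwood/reviews | brd/analysis/pair_index_with_reviews.py | specialsplit
-- ===== SOURCE A (Python) =====
-- def specialsplit(author):
--     '''
--     The goal here is basically to split an author name into parts,
--     using punctuation to divide parts, but stripping it. Probably a
--     simpler, more pythonic solution could be written.
--     '''
--
--     thispart = []
--     allnames = []
--
--     for idx, character in enumerate(author):
--         if character == '.' or character == ',' or character == ':' or character == '(' or character == ')' or character == ' ':
--             if len(thispart) > 0:
--                 thisname = ''.join(thispart)
--                 allnames.append(thisname)
--                 thispart = []
--         else:
--             thispart.append(character)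
--
--     if len(thispart) > 0:
--         thisname = ''.join(thispart)
--         allnames.append(thisname)
--
--     return allnames
-- ===== SOURCE B (Python) =====
-- import re
--
-- def specialsplit(author):
--     return re.findall(r'[^.,:() ]+', author)
-- ===== Notes on version B (the rewrite author's own statement) =====
-- stated objective: idiomatic
-- what changed: Replaced the manual character-accumulation loop with a single regex findall of maximal runs of non-delimiter characters.
import Mathlib
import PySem

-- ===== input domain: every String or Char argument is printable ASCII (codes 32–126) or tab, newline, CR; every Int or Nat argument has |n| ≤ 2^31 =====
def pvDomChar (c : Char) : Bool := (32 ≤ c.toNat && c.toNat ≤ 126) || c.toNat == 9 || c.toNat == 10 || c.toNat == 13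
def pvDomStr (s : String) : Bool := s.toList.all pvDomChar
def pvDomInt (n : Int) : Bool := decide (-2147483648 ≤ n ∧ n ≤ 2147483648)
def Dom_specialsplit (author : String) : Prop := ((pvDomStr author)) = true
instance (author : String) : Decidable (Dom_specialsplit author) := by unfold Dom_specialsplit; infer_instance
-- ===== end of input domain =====

-- B replaces A's manual character-accumulation loop with a regex-style scan for
-- maximal runs of non-delimiter characters (re.findall), for idiomatic clarity.


-- ===== PORT A =====
-- the delimiter test, exactly A's chained comparisons
def pvIsDelim (c : Char) : Bool :=
  c == '.' || c == ',' || c == ':' || c == '(' || c == ')' || c == ' '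

-- one iteration of A's for-loop over (idx, character); state = (thispart, allnames)
def pvStepA (st : List Char × List String) (p : Int × Char) : List Char × List String :=
  if pvIsDelim p.2 then
    if st.1.length > 0 then ([], st.2 ++ [String.mk st.1]) else st
  else (st.1 ++ [p.2], st.2)

def specialsplit (author : String) : List String :=
  let st := (PySem.List.enumerate author.toList).foldl pvStepA ([], [])
  if st.1.length > 0 then st.2 ++ [String.mk st.1] else st.2

-- ===== PORT B =====
-- re.findall(r'[^.,:() ]+', author): skip delimiters, emit each maximal
-- non-delimiter run (takeWhile), continue after it (dropWhile).
def pvRuns (cs : List Char) : List String :=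
  match cs with
  | [] => []
  | c :: rest =>
    if pvIsDelim c then pvRuns rest
    else
      String.mk (c :: rest.takeWhile (fun x => !pvIsDelim x)) ::
        pvRuns (rest.dropWhile (fun x => !pvIsDelim x))
termination_by cs.length
decreasing_by
  · simp
  · have := List.length_dropWhile_le (p := fun x => !pvIsDelim x) (l := rest)
    simp; omega

def specialsplit_alt (author : String) : List String := pvRuns author.toList

-- ===== PRECONDITION & SPEC =====
def Spec_specialsplit (author : String) (out : List String) : Prop := out = specialsplit_alt author
instance (author : String) (out : List String) : Decidable (Spec_specialsplit author out) := by unfold Spec_specialsplit; infer_instance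

-- ===== CLAIM (what is proved, stated in full; the proofs are below) =====
def Claim_equal_specialsplit : Prop := ∀ (author : String), Dom_specialsplit author → Spec_specialsplit author (specialsplit author)

-- ===== LEMMAS AND PROOFS =====

-- A's final flush of a pending part
def pvFinish (st : List Char × List String) : List String :=
  if st.1.length > 0 then st.2 ++ [String.mk st.1] else st.2

-- the enumerate index is dead state in A's loop
theorem pvFoldA_enum (cs : List Char) (n : Int) (st : List Char × List String) :
    (PySem.List.enumerate cs n).foldl pvStepA st =
      cs.foldl (fun s c => pvStepA s (0, c)) st := by
  induction cs generalizing n st with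
  | nil => simp [PySem.List.enumerate_nil]
  | cons c cs ih =>
    rw [PySem.List.enumerate_cons, List.foldl_cons, List.foldl_cons, ih]
    rfl

-- loop invariant: flushing the fold's result yields the emitted names so far,
-- then the pending run completed through cs, then the runs of the rest of cs
theorem pvFoldA_main (cs : List Char) (pending : List Char) (acc : List String) :
    pvFinish (cs.foldl (fun s c => pvStepA s (0, c)) (pending, acc)) =
      if pending = [] then acc ++ pvRuns cs
      else acc ++ (String.mk (pending ++ cs.takeWhile (fun x => !pvIsDelim x)) ::
        pvRuns (cs.dropWhile (fun x => !pvIsDelim x))) := by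
  induction cs generalizing pending acc with
  | nil =>
    rcases pending with _ | ⟨p, ps⟩ <;> simp [pvFinish, pvRuns]
  | cons c cs ih =>
    rw [List.foldl_cons]
    by_cases hd : pvIsDelim c
    · rcases pending with _ | ⟨p, ps⟩
      · have hstep : pvStepA (([] : List Char), acc) (0, c) = ([], acc) := by
          simp [pvStepA, hd]
        rw [hstep, ih]
        simp [pvRuns, hd]
      · have hstep : pvStepA ((p :: ps : List Char), acc) (0, c) =
            ([], acc ++ [String.mk (p :: ps)]) := by
          simp [pvStepA, hd]
        rw [hstep, ih]
        simp [pvRuns, List.takeWhile_cons, List.dropWhile_cons, hd]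
    · have hstep : pvStepA ((pending : List Char), acc) (0, c) =
          (pending ++ [c], acc) := by
        simp [pvStepA, hd]
      rw [hstep, ih]
      rcases pending with _ | ⟨p, ps⟩ <;>
        simp [pvRuns, List.takeWhile_cons, List.dropWhile_cons, hd]

-- ===== VERDICT (by name: the statement is the Claim_ definition above) =====
theorem specialsplit_spec : Claim_equal_specialsplit := by
  intro author _
  show (specialsplit author) = specialsplit_alt author
  unfold specialsplit specialsplit_alt
  rw [pvFoldA_enum]
  have := pvFoldA_main author.toList [] []
  simpa [pvFinish] using this
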